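-- pv_equiv track=rewrite | github.com/YichengYang-Ethan/QuantPath | scripts/collect_gradcafe_inertia.py | map_program
-- ===== SOURCE A (Python) =====
-- MFE_PROGRAMS = {
--     "baruch": "baruch-mfe", "cmu": "cmu-mscf", "mscf": "cmu-mscf",
--     "columbia": "columbia-msfe", "princeton": "princeton-mfin",
--     "mit": "mit-mfin", "berkeley": "berkeley-mfe",
--     "uchicago": "uchicago-msfm", "chicago": "uchicago-msfm",
--     "gatech": "gatech-qcf", "georgia tech": "gatech-qcf",
--     "cornell": "cornell-mfe", "nyu": "nyu-mfe",
--     "nyu tandon": "nyu-tandon-mfe",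
--     "stanford": "stanford-mcf", "ucla": "ucla-mfe",
--     "uiuc": "uiuc-msfe", "illinois": "uiuc-msfe",
--     "rutgers": "rutgers-mqf", "boston university": "bu-msmf",
--     "toronto": "toronto-mmf", "michigan": "michigan-qfr",
--     "carnegie mellon": "cmu-mscf", "stony brook": "stonybrook-qf",
--     "fordham": "fordham-msqf", "johns hopkins": "jhu-mfm",
--     "north carolina state": "ncstate-mfm",
--     "usc": "usc-msmf", "washington": "uwash-cfrm",
--     "stevens": "stevens-mfe", "oxford": "oxford-mcf",
--     "hec montreal": "hec-mfe",
-- }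
--
-- def map_program(school, program_name):
--     """Map GradCafe school+program to our program ID."""
--     combined = f"{school} {program_name}".lower()
--     for key, prog_id in sorted(MFE_PROGRAMS.items(), key=lambda x: -len(x[0])):
--         if key in combined:
--             return prog_id
--     if "financial engineering" in combined:
--         return "mfe-unknown"
--     if "financial math" in combined or "mathematical finance" in combined:
--         return "msfm-unknown"
--     if "computational finance" in combined:
--         return "cmu-mscf" if "carnegie" in combined else "mfe-unknown"
--     if "quantitative finance" in combined:
--         return "finance-unknown"
--     if "operations research" in combined:
--         return "or-unknown"
--     if "finance" in combined:
--         return "finance-unknown"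
--     return None
-- ===== SOURCE B (Python) =====
-- MFE_PROGRAMS = {
--     "baruch": "baruch-mfe", "cmu": "cmu-mscf", "mscf": "cmu-mscf",
--     "columbia": "columbia-msfe", "princeton": "princeton-mfin",
--     "mit": "mit-mfin", "berkeley": "berkeley-mfe",
--     "uchicago": "uchicago-msfm", "chicago": "uchicago-msfm",
--     "gatech": "gatech-qcf", "georgia tech": "gatech-qcf",
--     "cornell": "cornell-mfe", "nyu": "nyu-mfe",
--     "nyu tandon": "nyu-tandon-mfe",
--     "stanford": "stanford-mcf", "ucla": "ucla-mfe",
--     "uiuc": "uiuc-msfe", "illinois": "uiuc-msfe",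
--     "rutgers": "rutgers-mqf", "boston university": "bu-msmf",
--     "toronto": "toronto-mmf", "michigan": "michigan-qfr",
--     "carnegie mellon": "cmu-mscf", "stony brook": "stonybrook-qf",
--     "fordham": "fordham-msqf", "johns hopkins": "jhu-mfm",
--     "north carolina state": "ncstate-mfm",
--     "usc": "usc-msmf", "washington": "uwash-cfrm",
--     "stevens": "stevens-mfe", "oxford": "oxford-mcf",
--     "hec montreal": "hec-mfe",
-- }
--
-- # Generic fallback substrings in priority order; None marks the
-- # "computational finance" entry, whose result depends on "carnegie".
-- _FALLBACKS = [
--     ("financial engineering", "mfe-unknown"),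
--     ("financial math", "msfm-unknown"),
--     ("mathematical finance", "msfm-unknown"),
--     ("computational finance", None),
--     ("quantitative finance", "finance-unknown"),
--     ("operations research", "or-unknown"),
--     ("finance", "finance-unknown"),
-- ]
--
-- def map_program(school, program_name):
--     """Map GradCafe school+program to our program ID."""
--     combined = (school + " " + program_name).lower()
--     best_len = -1
--     best = None
--     for key, prog_id in MFE_PROGRAMS.items():
--         if len(key) > best_len and key in combined:
--             best_len = len(key)
--             best = prog_id
--     if best is not None:
--         return best
--     comp = "cmu-mscf" if "carnegie" in combined else "mfe-unknown"
--     for sub, res in _FALLBACKS: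
--         if sub in combined:
--             return res if res is not None else comp
--     return None
-- ===== Notes on version B (the rewrite author's own statement) =====
-- stated objective: simpler
-- what changed: Replaces A's per-call stable descending-length sort of the 32 dict keys by a single insertion-order scan that keeps the strictly-longest matching key (first-seen wins ties), and folds A's fallthrough if-chain into a scan of a fallback table with the carnegie-dependent value precomputed.
import Mathlib
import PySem

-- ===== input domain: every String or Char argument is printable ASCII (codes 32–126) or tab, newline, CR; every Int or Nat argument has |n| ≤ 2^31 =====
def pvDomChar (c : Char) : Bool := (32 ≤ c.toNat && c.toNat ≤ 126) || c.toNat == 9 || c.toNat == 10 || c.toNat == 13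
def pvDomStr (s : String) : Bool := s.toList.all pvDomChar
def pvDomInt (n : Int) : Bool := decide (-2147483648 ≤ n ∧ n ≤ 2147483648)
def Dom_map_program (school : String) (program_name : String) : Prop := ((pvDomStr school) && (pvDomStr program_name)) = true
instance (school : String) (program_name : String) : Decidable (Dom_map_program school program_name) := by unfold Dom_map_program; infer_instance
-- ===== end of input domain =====

-- B replaces A's per-call descending-length sort by a single insertion-order scan that keeps the
-- strictly-longest matching key, and folds A's fallthrough chain into a table scan (objective: simpler).

-- ===== PORT A =====
def MFE_PROGRAMS : PySem.Dict String String := PySem.Dict.ofList [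
  ("baruch", "baruch-mfe"), ("cmu", "cmu-mscf"), ("mscf", "cmu-mscf"),
  ("columbia", "columbia-msfe"), ("princeton", "princeton-mfin"),
  ("mit", "mit-mfin"), ("berkeley", "berkeley-mfe"),
  ("uchicago", "uchicago-msfm"), ("chicago", "uchicago-msfm"),
  ("gatech", "gatech-qcf"), ("georgia tech", "gatech-qcf"),
  ("cornell", "cornell-mfe"), ("nyu", "nyu-mfe"),
  ("nyu tandon", "nyu-tandon-mfe"),
  ("stanford", "stanford-mcf"), ("ucla", "ucla-mfe"),
  ("uiuc", "uiuc-msfe"), ("illinois", "uiuc-msfe"),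
  ("rutgers", "rutgers-mqf"), ("boston university", "bu-msmf"),
  ("toronto", "toronto-mmf"), ("michigan", "michigan-qfr"),
  ("carnegie mellon", "cmu-mscf"), ("stony brook", "stonybrook-qf"),
  ("fordham", "fordham-msqf"), ("johns hopkins", "jhu-mfm"),
  ("north carolina state", "ncstate-mfm"),
  ("usc", "usc-msmf"), ("washington", "uwash-cfrm"),
  ("stevens", "stevens-mfe"), ("oxford", "oxford-mcf"),
  ("hec montreal", "hec-mfe")]

-- A's for-loop: return the first (key, prog_id) of the sorted items whose key occurs in combined
def aLoop : List (String × String) → String → Option String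
  | [], _ => none
  | (k, v) :: t, c => if PySem.Str.isIn k c then some v else aLoop t c

-- A's fallthrough chain after the loop
def aFallback (c : String) : Option String :=
  if PySem.Str.isIn "financial engineering" c then some "mfe-unknown"
  else if PySem.Str.isIn "financial math" c || PySem.Str.isIn "mathematical finance" c then some "msfm-unknown"
  else if PySem.Str.isIn "computational finance" c then
    (if PySem.Str.isIn "carnegie" c then some "cmu-mscf" else some "mfe-unknown")
  else if PySem.Str.isIn "quantitative finance" c then some "finance-unknown"
  else if PySem.Str.isIn "operations research" c then some "or-unknown"
  else if PySem.Str.isIn "finance" c then some "finance-unknown"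
  else none

def map_program (school : String) (program_name : String) : Option String :=
  let combined := PySem.Str.lower (school ++ " " ++ program_name)
  match aLoop (PySem.List.sorted MFE_PROGRAMS.items (fun x => -(PySem.Str.len x.1)) false) combined with
  | some r => some r
  | none => aFallback combined

-- ===== PORT B =====
-- one pass over the dict in insertion order, keeping the strictly-longest matching key
def bScan : List (String × String) → Int → Option String → String → Option String
  | [], _, best, _ => best
  | (k, v) :: t, bestLen, best, c =>
    if bestLen < PySem.Str.len k && PySem.Str.isIn k c then
      bScan t (PySem.Str.len k) (some v) c
    else
      bScan t bestLen best c

-- the _FALLBACKS table; none marks the "computational finance" row, resolved by comp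
def bFallbacks : List (String × Option String) := [
  ("financial engineering", some "mfe-unknown"),
  ("financial math", some "msfm-unknown"),
  ("mathematical finance", some "msfm-unknown"),
  ("computational finance", none),
  ("quantitative finance", some "finance-unknown"),
  ("operations research", some "or-unknown"),
  ("finance", some "finance-unknown")]

def bFallbackLoop : List (String × Option String) → String → String → Option String
  | [], _, _ => none
  | (sub, res) :: t, comp, c =>
    if PySem.Str.isIn sub c then some (res.getD comp) else bFallbackLoop t comp c

def map_program_alt (school : String) (program_name : String) : Option String :=
  let combined := PySem.Str.lower (school ++ " " ++ program_name)
  match bScan MFE_PROGRAMS.items (-1) none combined with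
  | some b => some b
  | none =>
    let comp := if PySem.Str.isIn "carnegie" combined then "cmu-mscf" else "mfe-unknown"
    bFallbackLoop bFallbacks comp combined

-- ===== PRECONDITION & SPEC =====
def Spec_map_program (school : String) (program_name : String) (out : Option String) : Prop := out = map_program_alt school program_name
instance (school : String) (program_name : String) (out : Option String) : Decidable (Spec_map_program school program_name out) := by unfold Spec_map_program; infer_instance

-- ===== CLAIM (what is proved, stated in full; the proofs are below) =====
def Claim_equal_map_program : Prop := ∀ (school : String) (program_name : String), Dom_map_program school program_name → Spec_map_program school program_name (map_program school program_name)

-- ===== LEMMAS AND PROOFS =====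

-- key length of an entry
def pvLen (x : String × String) : Int := PySem.Str.len x.1

-- stable descending-by-length insertion (earlier-inserted element precedes equal-length ones)
def pvIns (e : String × String) : List (String × String) → List (String × String)
  | [] => [e]
  | x :: xs => if pvLen e < pvLen x then x :: pvIns e xs else e :: x :: xs

def pvInsSort : List (String × String) → List (String × String)
  | [] => []
  | e :: t => pvIns e (pvInsSort t)

def pvFilterGT (bl : Int) (l : List (String × String)) : List (String × String) :=
  l.filter (fun x => decide (bl < pvLen x))

def pvSortedDesc (l : List (String × String)) : Prop :=
  l.Pairwise (fun a b => pvLen b ≤ pvLen a)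

lemma pvLen_nonneg (x : String × String) : 0 ≤ pvLen x := by
  simp [pvLen, PySem.Str.len_eq]

lemma mem_pvIns {y e : String × String} {l : List (String × String)} :
    y ∈ pvIns e l ↔ y = e ∨ y ∈ l := by
  induction l with
  | nil => simp [pvIns]
  | cons x xs ih =>
    by_cases h : pvLen e < pvLen x
    · simp [pvIns, h, ih]
      tauto
    · simp [pvIns, h]

lemma pvIns_sorted {e : String × String} {l : List (String × String)}
    (h : pvSortedDesc l) : pvSortedDesc (pvIns e l) := by
  induction l with
  | nil => simp [pvSortedDesc, pvIns]
  | cons x xs ih =>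
    rw [pvSortedDesc, List.pairwise_cons] at h
    obtain ⟨hx, hxs⟩ := h
    by_cases hc : pvLen e < pvLen x
    · rw [pvSortedDesc]
      simp only [pvIns, if_pos hc, List.pairwise_cons]
      refine ⟨?_, ih hxs⟩
      intro y hy
      rcases mem_pvIns.mp hy with rfl | hy'
      · exact le_of_lt hc
      · exact hx y hy'
    · have hxe : pvLen x ≤ pvLen e := not_lt.mp hc
      rw [pvSortedDesc]
      simp only [pvIns, if_neg hc, List.pairwise_cons, List.mem_cons]
      refine ⟨?_, ?_, hxs⟩
      · rintro y (rfl | hy)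
        · exact hxe
        · exact le_trans (hx y hy) hxe
      · exact hx

lemma pvInsSort_sorted (l : List (String × String)) : pvSortedDesc (pvInsSort l) := by
  induction l with
  | nil => simp [pvSortedDesc, pvInsSort]
  | cons e t ih => exact pvIns_sorted ih

lemma pvFilterGT_sorted {bl : Int} {l : List (String × String)}
    (h : pvSortedDesc l) : pvSortedDesc (pvFilterGT bl l) := by
  rw [pvSortedDesc] at h ⊢
  exact h.filter _

lemma pvIns_of_le {e : String × String} {l : List (String × String)}
    (h : ∀ y ∈ l, pvLen y ≤ pvLen e) : pvIns e l = e :: l := by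
  cases l with
  | nil => rfl
  | cons x xs =>
    have : ¬ pvLen e < pvLen x := not_lt.mpr (h x (by simp))
    simp [pvIns, this]

lemma pvFilterGT_nil {bl : Int} {l : List (String × String)}
    (h : ∀ y ∈ l, pvLen y ≤ bl) : pvFilterGT bl l = [] := by
  rw [pvFilterGT, List.filter_eq_nil_iff]
  intro a ha
  simpa using not_lt.mpr (h a ha)

lemma pvFilterGT_cons_pos {bl : Int} {x : String × String} {l : List (String × String)}
    (h : bl < pvLen x) : pvFilterGT bl (x :: l) = x :: pvFilterGT bl l := by
  simp [pvFilterGT, h]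

lemma pvFilterGT_cons_neg {bl : Int} {x : String × String} {l : List (String × String)}
    (h : ¬ bl < pvLen x) : pvFilterGT bl (x :: l) = pvFilterGT bl l := by
  simp [pvFilterGT, h]

lemma pvFilterGT_pvIns {bl : Int} {e : String × String} {l : List (String × String)}
    (hl : pvSortedDesc l) :
    pvFilterGT bl (pvIns e l) =
      if bl < pvLen e then pvIns e (pvFilterGT bl l) else pvFilterGT bl l := by
  induction l with
  | nil =>
    by_cases h : bl < pvLen e <;> simp [pvIns, pvFilterGT, h]
  | cons x xs ih =>
    rw [pvSortedDesc, List.pairwise_cons] at hl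
    obtain ⟨hx, hxs⟩ := hl
    by_cases hc : pvLen e < pvLen x
    · have hins : pvIns e (x :: xs) = x :: pvIns e xs := by simp [pvIns, hc]
      by_cases hb : bl < pvLen e
      · have hbx : bl < pvLen x := lt_trans hb hc
        rw [hins, pvFilterGT_cons_pos hbx, ih hxs, if_pos hb, if_pos hb,
            pvFilterGT_cons_pos hbx]
        simp [pvIns, hc]
      · by_cases hbx : bl < pvLen x
        · rw [hins, pvFilterGT_cons_pos hbx, ih hxs, if_neg hb, if_neg hb,
              pvFilterGT_cons_pos hbx]
        · rw [hins, pvFilterGT_cons_neg hbx, ih hxs, if_neg hb, if_neg hb,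
              pvFilterGT_cons_neg hbx]
    · have hxe : pvLen x ≤ pvLen e := not_lt.mp hc
      have hins : pvIns e (x :: xs) = e :: x :: xs := by simp [pvIns, hc]
      by_cases hb : bl < pvLen e
      · rw [hins, pvFilterGT_cons_pos hb, if_pos hb]
        have hle : ∀ y ∈ pvFilterGT bl (x :: xs), pvLen y ≤ pvLen e := by
          intro y hy
          simp only [pvFilterGT] at hy
          rcases List.mem_cons.mp (List.mem_filter.mp hy).1 with rfl | h
          · exact hxe
          · exact le_trans (hx y h) hxe
        rw [pvIns_of_le hle]
      · rw [hins, pvFilterGT_cons_neg hb, if_neg hb]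

lemma aLoop_pvIns_false {k v : String} {l : List (String × String)} {c : String}
    (hp : PySem.Str.isIn k c = false) : aLoop (pvIns (k, v) l) c = aLoop l c := by
  induction l with
  | nil =>
    rw [show pvIns (k, v) [] = [(k, v)] from rfl]
    simp only [aLoop]
    rw [if_neg (by rw [hp]; simp)]
  | cons x xs ih =>
    obtain ⟨xk, xv⟩ := x
    by_cases hc : pvLen (k, v) < pvLen (xk, xv)
    · rw [show pvIns (k, v) ((xk, xv) :: xs) = (xk, xv) :: pvIns (k, v) xs from by
        simp [pvIns, hc]]
      simp only [aLoop]
      rw [ih]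
    · rw [show pvIns (k, v) ((xk, xv) :: xs) = (k, v) :: (xk, xv) :: xs from by
        simp [pvIns, hc]]
      simp only [aLoop]
      rw [if_neg (by rw [hp]; simp)]

lemma aLoop_pvIns_true {k v : String} {l : List (String × String)} {c : String}
    (hl : pvSortedDesc l) (hp : PySem.Str.isIn k c = true) :
    aLoop (pvIns (k, v) l) c
      = (aLoop (pvFilterGT (pvLen (k, v)) l) c).or (some v) := by
  induction l with
  | nil =>
    rw [show pvIns (k, v) [] = [(k, v)] from rfl]
    simp only [aLoop, pvFilterGT, List.filter_nil]
    rw [if_pos hp]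
    rfl
  | cons x xs ih =>
    rw [pvSortedDesc, List.pairwise_cons] at hl
    obtain ⟨hx, hxs⟩ := hl
    obtain ⟨xk, xv⟩ := x
    by_cases hc : pvLen (k, v) < pvLen (xk, xv)
    · rw [show pvIns (k, v) ((xk, xv) :: xs) = (xk, xv) :: pvIns (k, v) xs from by
        simp [pvIns, hc], pvFilterGT_cons_pos hc]
      simp only [aLoop]
      by_cases hpx : PySem.Str.isIn xk c
      · rw [if_pos hpx, if_pos hpx]
        rfl
      · rw [if_neg hpx, if_neg hpx]
        exact ih hxs
    · have hxe : pvLen (xk, xv) ≤ pvLen (k, v) := not_lt.mp hc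
      have hfil : pvFilterGT (pvLen (k, v)) ((xk, xv) :: xs) = [] := by
        apply pvFilterGT_nil
        intro y hy
        rcases List.mem_cons.mp hy with rfl | h
        · exact hxe
        · exact le_trans (hx y h) hxe
      rw [show pvIns (k, v) ((xk, xv) :: xs) = (k, v) :: (xk, xv) :: xs from by
        simp [pvIns, hc], hfil]
      simp only [aLoop]
      rw [if_pos hp]
      rfl

lemma pvFilterGT_pvFilterGT {a b : Int} {l : List (String × String)} (h : b ≤ a) :
    pvFilterGT a (pvFilterGT b l) = pvFilterGT a l := by
  rw [pvFilterGT, pvFilterGT, pvFilterGT, List.filter_filter]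
  apply List.filter_congr
  intro x _
  by_cases hx : a < pvLen x
  · have hbx : b < pvLen x := lt_of_le_of_lt h hx
    simp [hx, hbx]
  · simp [hx]

lemma bScan_eq (c : String) (t : List (String × String)) :
    ∀ (bl : Int) (best : Option String),
      bScan t bl best c = (aLoop (pvFilterGT bl (pvInsSort t)) c).or best := by
  induction t with
  | nil => intro bl best; simp [bScan, pvInsSort, pvFilterGT, aLoop]
  | cons e t ih =>
    intro bl best
    obtain ⟨k, v⟩ := e
    have hsorted := pvInsSort_sorted t
    rw [show pvInsSort ((k, v) :: t) = pvIns (k, v) (pvInsSort t) from rfl,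
        pvFilterGT_pvIns hsorted]
    have hlen : pvLen (k, v) = PySem.Str.len k := rfl
    by_cases hb : bl < PySem.Str.len k
    · rw [if_pos (show bl < pvLen (k, v) from hb)]
      by_cases hp : PySem.Str.isIn k c
      · rw [show bScan ((k, v) :: t) bl best c = bScan t (PySem.Str.len k) (some v) c from by
          simp only [bScan]
          rw [if_pos (by simp only [Bool.and_eq_true, decide_eq_true_eq]; exact ⟨hb, hp⟩)]]
        rw [ih, aLoop_pvIns_true (pvFilterGT_sorted hsorted) hp, hlen,
            pvFilterGT_pvFilterGT (le_of_lt hb), Option.or_assoc]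
        rfl
      · have hp' : PySem.Str.isIn k c = false := by simpa using hp
        rw [show bScan ((k, v) :: t) bl best c = bScan t bl best c from by
          simp only [bScan]
          rw [if_neg (by rw [hp', Bool.and_false]; simp)]]
        rw [ih, aLoop_pvIns_false hp']
    · rw [if_neg (show ¬ bl < pvLen (k, v) from hb)]
      rw [show bScan ((k, v) :: t) bl best c = bScan t bl best c from by
        simp only [bScan]
        rw [if_neg (by rw [decide_eq_false hb, Bool.false_and]; simp)]]
      exact ih bl best

lemma sorted_items_eq :
    PySem.List.sorted MFE_PROGRAMS.items (fun x => -(PySem.Str.len x.1)) false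
      = pvInsSort MFE_PROGRAMS.items := by decide

lemma pvFilterGT_neg_one (l : List (String × String)) : pvFilterGT (-1) l = l := by
  rw [pvFilterGT, List.filter_eq_self]
  intro a _
  have := pvLen_nonneg a
  simp only [decide_eq_true_eq]
  omega

lemma fallback_eq (c : String) :
    aFallback c = bFallbackLoop bFallbacks
      (if PySem.Str.isIn "carnegie" c then "cmu-mscf" else "mfe-unknown") c := by
  simp only [aFallback, bFallbacks, bFallbackLoop]
  split_ifs <;> simp_all

-- ===== VERDICT (by name: the statement is the Claim_ definition above) =====
theorem map_program_spec : Claim_equal_map_program := by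
  intro school program_name _
  show map_program school program_name = map_program_alt school program_name
  rw [map_program, map_program_alt]
  generalize PySem.Str.lower (school ++ " " ++ program_name) = c
  rw [sorted_items_eq, bScan_eq c MFE_PROGRAMS.items (-1) none, pvFilterGT_neg_one,
      Option.or_none]
  cases h : aLoop (pvInsSort MFE_PROGRAMS.items) c with
  | some r => rfl
  | none => exact fallback_eq c
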